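-- pv_equiv track=rewrite | github.com/Fondamenti18/fondamenti-di-programmazione | students/1813693/homework01/program03.py | coppie_1
-- ===== SOURCE A (Python) =====
-- def chiave(s):
--     lista=[]
--     seq_dis=''
--     i=len(s)-1
--     while i>=0:
--         if 'a'<=s[i]<='z':
--             lista=[s[i]]+lista
--             if s[i] in lista[1: ]:
--                 lista.remove(s[i])
--         i-=1
--     return seq_dis.join(lista)
--
-- def inverti(stringa):
--     seq_ord=''
--     a=chiave(stringa)
--     return seq_ord.join(sorted(a))
--
-- def coppie_1(s):
--     d={}
--     p=0
--     s1=chiave(s)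
--     s2=inverti(s)
--     while p<len(s1):
--         d[s1[p]]=s2[p]
--         p+=1
--     return d
-- ===== SOURCE B (Python) =====
-- def coppie_1(s):
--     last = {}
--     for i, c in enumerate(s):
--         if 'a' <= c <= 'z':
--             last[c] = i
--     order = sorted(last, key=lambda c: last[c])
--     vals = sorted(last)
--     return {order[p]: vals[p] for p in range(len(order))}
-- ===== Notes on version B (the rewrite author's own statement) =====
-- stated objective: faster
-- what changed: Replaces the reverse scan with prepend/remove list maintenance (run twice: chiave is recomputed inside inverti) by one forward pass building a last-occurrence index table, then two sorts of its keys (by last index, and alphabetically) zipped positionally into the dict.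
import Mathlib
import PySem

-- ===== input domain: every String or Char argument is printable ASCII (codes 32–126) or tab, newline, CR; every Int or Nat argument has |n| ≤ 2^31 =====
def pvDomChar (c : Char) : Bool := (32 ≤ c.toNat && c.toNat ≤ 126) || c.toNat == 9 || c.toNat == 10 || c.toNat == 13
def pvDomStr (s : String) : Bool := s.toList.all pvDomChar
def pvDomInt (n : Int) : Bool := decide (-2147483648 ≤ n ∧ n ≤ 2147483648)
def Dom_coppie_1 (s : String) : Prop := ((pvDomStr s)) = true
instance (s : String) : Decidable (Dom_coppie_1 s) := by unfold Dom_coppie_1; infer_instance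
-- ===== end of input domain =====

-- B builds a last-occurrence index table in one pass and sorts its keys (by last index, and alphabetically), instead of A's reverse scan with list prepend/remove plus a second pass.


-- ===== PORT A =====
-- 'a' <= c <= 'z'
def pvLcA (c : Char) : Bool := 'a' ≤ c && c ≤ 'z'

-- the while loop of chiave: i runs len(s)-1 .. 0; the Nat argument is i+1
def chiaveLoop (cs : List Char) : Nat → List Char → List Char
  | 0, lista => lista
  | k + 1, lista =>
      let c := cs.getD k ' '
      if pvLcA c then
        let l1 := c :: lista
        let l2 := if (l1.drop 1).contains c then (PySem.List.remove? l1 c).getD l1 else l1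
        chiaveLoop cs k l2
      else chiaveLoop cs k lista

def chiave (s : String) : String := String.ofList (chiaveLoop s.toList s.toList.length [])

def inverti (stringa : String) : String :=
  let a := chiave stringa
  String.ofList (PySem.List.sorted a.toList (fun x => x) false)

def coppie_1 (s : String) : List (String × String) :=
  let s1 := (chiave s).toList
  let s2 := (inverti s).toList
  -- while p < len(s1): d[s1[p]] = s2[p]
  ((PySem.List.pyRange 0 (s1.length : Int) 1).foldl
      (fun d p => d.insert (String.ofList [PySem.List.pyGetD s1 p ' ']) (String.ofList [PySem.List.pyGetD s2 p ' ']))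
      PySem.Dict.empty).items

-- ===== PORT B =====
-- 'a' <= c <= 'z'
def pvLcB (c : Char) : Bool := 'a' ≤ c && c ≤ 'z'

def coppie_1_alt (s : String) : List (String × String) :=
  let last : PySem.Dict Char Int :=
    (PySem.List.enumerate s.toList 0).foldl
      (fun d ic => if pvLcB ic.2 then d.insert ic.2 ic.1 else d) PySem.Dict.empty
  -- last[c] never misses (every listed key is in the dict), so getD is exact here
  let order := PySem.List.sorted last.keys (fun c => last.getD c 0) false
  let vals := PySem.List.sorted last.keys (fun c : Char => c) false
  ((PySem.List.pyRange 0 (order.length : Int) 1).foldl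
      (fun d p => d.insert (String.ofList [PySem.List.pyGetD order p ' ']) (String.ofList [PySem.List.pyGetD vals p ' ']))
      PySem.Dict.empty).items

-- ===== PRECONDITION & SPEC =====
def Spec_coppie_1 (s : String) (out : List (String × String)) : Prop := out = coppie_1_alt s
instance (s : String) (out : List (String × String)) : Decidable (Spec_coppie_1 s out) := by unfold Spec_coppie_1; infer_instance

-- ===== CLAIM (what is proved, stated in full; the proofs are below) =====
def Claim_equal_coppie_1 : Prop := ∀ (s : String), Dom_coppie_1 s → Spec_coppie_1 s (coppie_1 s)

-- ===== LEMMAS AND PROOFS =====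

-- one step of A's reverse scan, simplified (the remove always removes the just-prepended head)
def pvStep (c : Char) (acc : List Char) : List Char :=
  if pvLcA c then (if acc.contains c then acc else c :: acc) else acc

-- A's key list, as a foldr
def pvK (cs : List Char) : List Char := cs.foldr pvStep []

theorem chiaveLoop_eq_foldr (cs : List Char) (k : Nat) (hk : k ≤ cs.length) (lista : List Char) :
    chiaveLoop cs k lista = (cs.take k).foldr pvStep lista := by
  induction k generalizing lista with
  | zero => simp [chiaveLoop]
  | succ k ih =>
    have hk' : k < cs.length := hk
    have hget : cs.getD k ' ' = cs[k] := by
      simp [List.getD_eq_getElem?_getD, List.getElem?_eq_getElem hk']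
    have htake : cs.take (k + 1) = cs.take k ++ [cs[k]] := by
      rw [List.take_add_one, List.getElem?_eq_getElem hk']; rfl
    have hstep : chiaveLoop cs (k + 1) lista = chiaveLoop cs k (pvStep cs[k] lista) := by
      simp only [chiaveLoop, hget, List.drop_one, List.tail_cons,
        PySem.List.remove?_cons_self, Option.getD_some, pvStep]
      split_ifs <;> rfl
    rw [htake, List.foldr_append, hstep, ih (Nat.le_of_succ_le hk)]
    rfl

theorem chiave_toList (s : String) : (chiave s).toList = pvK s.toList := by
  have h := chiaveLoop_eq_foldr s.toList s.toList.length (le_refl _) []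
  rw [List.take_length] at h
  unfold chiave
  rw [String.toList_ofList, h]
  rfl

-- membership in pvK
theorem mem_of_mem_pvK (cs : List Char) (a : Char) (h : a ∈ pvK cs) : pvLcA a = true ∧ a ∈ cs := by
  induction cs with
  | nil => simp [pvK] at h
  | cons c t ih =>
    have h' : a ∈ pvStep c (pvK t) := h
    unfold pvStep at h'
    split_ifs at h' with h1 h2
    · obtain ⟨ha, hb⟩ := ih h'; exact ⟨ha, List.mem_cons_of_mem _ hb⟩
    · rcases List.mem_cons.mp h' with rfl | hmem
      · exact ⟨h1, List.mem_cons_self ..⟩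
      · obtain ⟨ha, hb⟩ := ih hmem; exact ⟨ha, List.mem_cons_of_mem _ hb⟩
    · obtain ⟨ha, hb⟩ := ih h'; exact ⟨ha, List.mem_cons_of_mem _ hb⟩

theorem mem_pvK_of (cs : List Char) (a : Char) (h1 : pvLcA a = true) (h2 : a ∈ cs) :
    a ∈ pvK cs := by
  induction cs with
  | nil => simp at h2
  | cons c t ih =>
    show a ∈ pvStep c (pvK t)
    unfold pvStep
    rcases List.mem_cons.mp h2 with rfl | hm
    · rw [if_pos h1]
      by_cases hB : (pvK t).contains a = true
      · rw [if_pos hB]; simpa using hB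
      · rw [if_neg hB]; exact List.mem_cons_self ..
    · have hin := ih hm
      split_ifs <;> simp [hin]

theorem mem_pvK (cs : List Char) (a : Char) : a ∈ pvK cs ↔ pvLcA a = true ∧ a ∈ cs :=
  ⟨mem_of_mem_pvK cs a, fun ⟨h1, h2⟩ => mem_pvK_of cs a h1 h2⟩

theorem nodup_pvK (cs : List Char) : (pvK cs).Nodup := by
  induction cs with
  | nil => simp [pvK]
  | cons c t ih =>
    show (pvStep c (pvK t)).Nodup
    unfold pvStep
    split_ifs with h1 h2
    · exact ih
    · exact List.Nodup.cons (by simpa using h2) ih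
    · exact ih

-- last occurrence position of a within cs (meaningful when a ∈ cs)
def pvLastPos (cs : List Char) (a : Char) : Int :=
  match cs with
  | [] => 0
  | _ :: t => if a ∈ t then 1 + pvLastPos t a else 0

theorem pvLastPos_nonneg (cs : List Char) (a : Char) : 0 ≤ pvLastPos cs a := by
  induction cs with
  | nil => simp [pvLastPos]
  | cons x y ihy => by_cases hm : a ∈ y <;> simp [pvLastPos, hm] <;> omega

-- B's dict-building fold, generalized over start index and accumulator
def pvLastFrom (cs : List Char) (i : Int) (d : PySem.Dict Char Int) : PySem.Dict Char Int :=
  (PySem.List.enumerate cs i).foldl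
    (fun d ic => if pvLcB ic.2 then d.insert ic.2 ic.1 else d) d

theorem pvLastFrom_cons (c : Char) (t : List Char) (i : Int) (d : PySem.Dict Char Int) :
    pvLastFrom (c :: t) i d = pvLastFrom t (i + 1) (if pvLcB c then d.insert c i else d) := by
  simp only [pvLastFrom, PySem.List.enumerate_cons, List.foldl_cons]

theorem get?_pvLastFrom_not_mem (cs : List Char) (i : Int) (d : PySem.Dict Char Int)
    (a : Char) (ha : a ∉ cs) : (pvLastFrom cs i d).get? a = d.get? a := by
  induction cs generalizing i d with
  | nil => simp [pvLastFrom, PySem.List.enumerate]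
  | cons c t ih =>
    rw [pvLastFrom_cons, ih _ _ (by simp_all)]
    split_ifs with h
    · rw [PySem.Dict.get?_insert]
      rw [if_neg (by simp_all)]
    · rfl

theorem get?_pvLastFrom_mem (cs : List Char) (i : Int) (d : PySem.Dict Char Int)
    (a : Char) (hlc : pvLcB a = true) (ha : a ∈ cs) :
    (pvLastFrom cs i d).get? a = some (i + pvLastPos cs a) := by
  induction cs generalizing i d with
  | nil => simp at ha
  | cons c t ih =>
    rw [pvLastFrom_cons]
    by_cases hm : a ∈ t
    · rw [ih _ _ hm]
      simp only [pvLastPos, hm, if_pos]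
      congr 1; ring
    · have hac : a = c := by
        rcases List.mem_cons.mp ha with h | h
        · exact h
        · exact absurd h hm
      subst hac
      rw [get?_pvLastFrom_not_mem _ _ _ _ hm]
      simp [hlc, PySem.Dict.get?_insert_self, pvLastPos, hm]

theorem mem_keys_pvLastFrom (cs : List Char) (i : Int) (d : PySem.Dict Char Int) (a : Char) :
    a ∈ (pvLastFrom cs i d).keys ↔ a ∈ d.keys ∨ (pvLcB a = true ∧ a ∈ cs) := by
  induction cs generalizing i d with
  | nil => simp [pvLastFrom, PySem.List.enumerate]
  | cons c t ih =>
    rw [pvLastFrom_cons, ih]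
    by_cases h : pvLcB c = true
    · simp only [h, if_pos, PySem.Dict.mem_keys_insert, List.mem_cons]
      constructor
      · rintro ((rfl | hk) | ⟨h1, h2⟩)
        · exact Or.inr ⟨h, Or.inl rfl⟩
        · exact Or.inl hk
        · exact Or.inr ⟨h1, Or.inr h2⟩
      · rintro (hk | ⟨h1, rfl | h2⟩)
        · exact Or.inl (Or.inr hk)
        · exact Or.inl (Or.inl rfl)
        · exact Or.inr ⟨h1, h2⟩
    · simp only [h, Bool.false_eq_true, if_false, List.mem_cons]
      constructor
      · rintro (hk | ⟨h1, h2⟩)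
        · exact Or.inl hk
        · exact Or.inr ⟨h1, Or.inr h2⟩
      · rintro (hk | ⟨h1, rfl | h2⟩)
        · exact Or.inl hk
        · exact absurd h1 h
        · exact Or.inr ⟨h1, h2⟩

theorem nodup_keys_pvLastFrom (cs : List Char) (i : Int) (d : PySem.Dict Char Int)
    (hd : d.keys.Nodup) : (pvLastFrom cs i d).keys.Nodup := by
  induction cs generalizing i d with
  | nil => simpa [pvLastFrom, PySem.List.enumerate]
  | cons c t ih =>
    rw [pvLastFrom_cons]
    apply ih
    split_ifs with h
    · exact PySem.Dict.nodup_keys_insert _ _ _ hd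
    · exact hd

-- pvK is strictly increasing in last-occurrence position
theorem pairwise_lastPos_pvK (cs : List Char) :
    (pvK cs).Pairwise (fun a b => pvLastPos cs a < pvLastPos cs b) := by
  induction cs with
  | nil => simp [pvK]
  | cons c t ih =>
    show (pvStep c (pvK t)).Pairwise _
    have hshift : ∀ x ∈ pvK t, pvLastPos (c :: t) x = 1 + pvLastPos t x := by
      intro x hx
      have : x ∈ t := ((mem_pvK t x).mp hx).2
      simp [pvLastPos, this]
    have hP : (pvK t).Pairwise (fun a b => pvLastPos (c :: t) a < pvLastPos (c :: t) b) := by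
      refine List.Pairwise.imp_of_mem ?_ ih
      intro a b ha hb h
      rw [hshift a ha, hshift b hb]; omega
    unfold pvStep
    split_ifs with h1 h2
    · exact hP
    · refine List.Pairwise.cons ?_ hP
      intro b hb
      have hct : c ∉ t := by
        intro hct
        have : c ∈ pvK t := (mem_pvK t c).mpr ⟨h1, hct⟩
        simp_all
      have h0 : pvLastPos (c :: t) c = 0 := by simp [pvLastPos, hct]
      rw [h0, hshift b hb]
      have := pvLastPos_nonneg t b
      omega
    · exact hP

-- the common permutation: A's key list is a rearrangement of B's dict keys
theorem pvK_perm_keys (s : String) :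
    (pvK s.toList).Perm (pvLastFrom s.toList 0 PySem.Dict.empty).keys := by
  rw [List.perm_ext_iff_of_nodup (nodup_pvK _) (nodup_keys_pvLastFrom _ _ _ (by simp))]
  intro a
  rw [mem_pvK, mem_keys_pvLastFrom]
  simp only [PySem.Dict.keys_empty, List.not_mem_nil, false_or]
  constructor <;> rintro ⟨h1, h2⟩ <;> exact ⟨by simpa [pvLcA, pvLcB] using h1, h2⟩

-- the main equality: B's key order is A's chiave
theorem order_eq_pvK (s : String) :
    PySem.List.sorted (pvLastFrom s.toList 0 PySem.Dict.empty).keys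
      (fun c => (pvLastFrom s.toList 0 PySem.Dict.empty).getD c 0) false = pvK s.toList := by
  have hgetD : ∀ a ∈ pvK s.toList,
      (pvLastFrom s.toList 0 PySem.Dict.empty).getD a 0 = pvLastPos s.toList a := by
    intro a ha
    obtain ⟨h1, h2⟩ := (mem_pvK _ a).mp ha
    have hg := get?_pvLastFrom_mem s.toList 0 PySem.Dict.empty a
      (by simpa [pvLcA, pvLcB] using h1) h2
    rw [PySem.Dict.getD_eq_get?_getD, hg]
    simp
  refine PySem.List.sorted_eq_of_perm_of_pairwise_lt _ _ _ (pvK_perm_keys s) ?_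
  refine List.Pairwise.imp_of_mem ?_ (pairwise_lastPos_pvK s.toList)
  intro a b ha hb h
  rw [hgetD a ha, hgetD b hb]; exact h

theorem vals_eq_sorted_pvK (s : String) :
    PySem.List.sorted (pvLastFrom s.toList 0 PySem.Dict.empty).keys (fun c : Char => c) false
      = PySem.List.sorted (pvK s.toList) (fun c : Char => c) false := by
  exact PySem.List.sorted_eq_sorted_of_perm _ _ _ (fun a b h => h) (pvK_perm_keys s).symm

-- ===== VERDICT (by name: the statement is the Claim_ definition above) =====
theorem coppie_1_spec : Claim_equal_coppie_1 := by
  intro s _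
  show coppie_1 s = coppie_1_alt s
  have hfold : ((PySem.List.enumerate s.toList 0).foldl
      (fun d ic => if pvLcB ic.2 then d.insert ic.2 ic.1 else d) PySem.Dict.empty)
      = pvLastFrom s.toList 0 PySem.Dict.empty := rfl
  simp only [coppie_1, coppie_1_alt, inverti, hfold, chiave_toList, String.toList_ofList,
    order_eq_pvK s, vals_eq_sorted_pvK s]
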